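-- pv_equiv track=rewrite | github.com/ktawiah/CodePath-DSA | Unit-2/Session-2/Standard_V2/valid_itenary.py | is_valid_itinerary
-- ===== SOURCE A (Python) =====
-- def is_valid_itinerary(itinerary):
--     """
--     P: Check if last city(max of itinerary) is visited twice and other cities visited once
--     E: 1. Invalid itinerary list, len < max -> False
--     2. No cities to visit -> False
--     """
--     # Check no city
--     if len(itinerary) == 0:
--         return False
--
--     # Get the last city
--     last_city = max(itinerary)
--
--     # Check if len of itinerary is less than last city
--     if len(itinerary)-1 != last_city:
--         return False
--
--     # Create a map of counts
--     freq_map = {}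
--     for city in itinerary:
--         freq_map[city] = freq_map.get(city, 0) + 1
--
--     # Iterate through map
--     for key, value in freq_map.items():
--
--         # Return key with max count
--         if (key == last_city and value != 2) or (key != last_city and value != 1):
--             return False
--
--     return True
-- ===== SOURCE B (Python) =====
-- def is_valid_itinerary(itinerary):
--     if len(itinerary) == 0:
--         return False
--     last_city = max(itinerary)
--     if len(itinerary) - 1 != last_city:
--         return False
--     return itinerary.count(last_city) == 2 and len(itinerary) - len(set(itinerary)) == 1
-- ===== Notes on version B (the rewrite author's own statement) =====
-- stated objective: simpler
-- what changed: Replaced the frequency-dict build and the per-key validation loop with one closed expression: the last city must occur exactly twice and the count of duplicate occurrences (len(itinerary) - len(set(itinerary))) must be exactly 1.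
import Mathlib
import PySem

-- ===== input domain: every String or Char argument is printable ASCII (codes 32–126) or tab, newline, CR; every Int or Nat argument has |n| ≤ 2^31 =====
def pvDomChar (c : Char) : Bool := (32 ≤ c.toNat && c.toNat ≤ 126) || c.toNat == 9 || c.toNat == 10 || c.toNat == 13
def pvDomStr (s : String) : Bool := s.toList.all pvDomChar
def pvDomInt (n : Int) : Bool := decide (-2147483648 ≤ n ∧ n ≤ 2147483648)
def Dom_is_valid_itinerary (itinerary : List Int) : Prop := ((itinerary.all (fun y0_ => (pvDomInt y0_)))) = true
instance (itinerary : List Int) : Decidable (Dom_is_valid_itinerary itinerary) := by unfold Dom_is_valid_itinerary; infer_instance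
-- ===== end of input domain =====

-- B replaces A's frequency-dict build and per-key validation loop by one closed
-- expression (count of the last city == 2, and exactly one duplicate occurrence
-- measured by len - len(set)); objective: simpler.


-- ===== PORT A =====
-- the 'for key, value in freq_map.items()' loop with its early 'return False'
def isValidLoop (last_city : Int) : List (Int × Int) → Bool
  | [] => true
  | (key, value) :: rest =>
    if (key == last_city && value != 2) || (key != last_city && value != 1) then false
    else isValidLoop last_city rest

def is_valid_itinerary (itinerary : List Int) : Bool :=
  if itinerary.length == 0 then false
  else
    match PySem.List.max? itinerary (fun x => x) with
    | none => false  -- unreachable: max() on an empty list is behind the guard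
    | some last_city =>
      if ((itinerary.length : Int) - 1) != last_city then false
      else
        let freq_map := itinerary.foldl
          (fun d city => d.insert city (d.getD city 0 + 1)) PySem.Dict.empty
        isValidLoop last_city freq_map.items

-- ===== PORT B =====
def is_valid_itinerary_alt (itinerary : List Int) : Bool :=
  if itinerary.length == 0 then false
  else
    match PySem.List.max? itinerary (fun x => x) with
    | none => false  -- unreachable: max() on an empty list is behind the guard
    | some last_city =>
      if ((itinerary.length : Int) - 1) != last_city then false
      else
        (PySem.List.count itinerary last_city == 2) &&
        (((itinerary.length : Int) - ((PySem.Set.ofList itinerary).length : Int)) == 1)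

-- ===== PRECONDITION & SPEC =====
def Spec_is_valid_itinerary (itinerary : List Int) (out : Bool) : Prop := out = is_valid_itinerary_alt itinerary
instance (itinerary : List Int) (out : Bool) : Decidable (Spec_is_valid_itinerary itinerary out) := by unfold Spec_is_valid_itinerary; infer_instance

-- ===== CLAIM (what is proved, stated in full; the proofs are below) =====
def Claim_equal_is_valid_itinerary : Prop := ∀ (itinerary : List Int), Dom_is_valid_itinerary itinerary → Spec_is_valid_itinerary itinerary (is_valid_itinerary itinerary)

-- ===== LEMMAS AND PROOFS =====

-- A's dict build is Counter
lemma freq_eq_counter (xs : List Int) :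
    xs.foldl (fun d city => d.insert city (d.getD city 0 + 1)) PySem.Dict.empty
      = PySem.Dict.counter xs := by
  rw [PySem.Dict.counter_eq_foldl]; rfl

-- A's validation loop as a predicate on all items
lemma isValidLoop_eq_all (last : Int) (l : List (Int × Int)) :
    isValidLoop last l
      = l.all (fun p => if p.1 = last then p.2 == 2 else p.2 == 1) := by
  induction l with
  | nil => rfl
  | cons p rest ih =>
    obtain ⟨k, v⟩ := p
    simp only [isValidLoop, List.all_cons, ih]
    by_cases hk : k = last <;> by_cases hv2 : v = 2 <;> by_cases hv1 : v = 1 <;>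
      simp_all

-- each count ≥ 1 ⇒ length ≤ sum of counts
lemma length_le_sum {f : Int → ℕ} {T : List Int} (hpos : ∀ k ∈ T, 1 ≤ f k) :
    T.length ≤ (T.map f).sum := by
  induction T with
  | nil => simp
  | cons a T ih =>
    simp only [List.map_cons, List.sum_cons, List.length_cons]
    have ha := hpos a (by simp)
    have := ih (fun k hk => hpos k (by simp [hk]))
    omega

lemma all_one_iff {f : Int → ℕ} {T : List Int} (hpos : ∀ k ∈ T, 1 ≤ f k) :
    (∀ k ∈ T, f k = 1) ↔ (T.map f).sum = T.length := by
  induction T with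
  | nil => simp
  | cons a T ih =>
    have ha := hpos a (by simp)
    have hT := fun k hk => hpos k (List.mem_cons_of_mem a hk)
    have hlen := length_le_sum hT
    simp only [List.map_cons, List.sum_cons, List.length_cons, List.mem_cons]
    constructor
    · rintro h
      have := (ih hT).mp (fun k hk => h k (Or.inr hk))
      have := h a (Or.inl rfl)
      omega
    · intro h
      have hsum : (T.map f).sum = T.length := by omega
      have := (ih hT).mpr hsum
      rintro k (rfl | hk)
      · omega
      · exact this k hk

-- the core cardinality characterisation, on any nodup list containing `last`
lemma key_iff {S : List Int} {f : Int → ℕ} {last : Int}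
    (hnd : S.Nodup) (hmem : last ∈ S) (hpos : ∀ k ∈ S, 1 ≤ f k) :
    (∀ k ∈ S, f k = if k = last then 2 else 1)
      ↔ (f last = 2 ∧ (S.map f).sum = S.length + 1) := by
  have hperm : List.Perm S (last :: S.erase last) := List.perm_cons_erase hmem
  have hsum : (S.map f).sum = f last + ((S.erase last).map f).sum := by
    have := (hperm.map f).sum_eq; simpa using this
  have hlen : S.length = (S.erase last).length + 1 := by
    have := hperm.length_eq; simpa using this
  have hmemE : ∀ k, k ∈ S.erase last ↔ k ≠ last ∧ k ∈ S := by
    intro k; exact hnd.mem_erase_iff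
  have hposE : ∀ k ∈ S.erase last, 1 ≤ f k :=
    fun k hk => hpos k ((hmemE k).mp hk).2
  constructor
  · intro h
    have hlast : f last = 2 := by simpa using h last hmem
    have hone : ∀ k ∈ S.erase last, f k = 1 := by
      intro k hk
      obtain ⟨hne, hkS⟩ := (hmemE k).mp hk
      simpa [hne] using h k hkS
    have := (all_one_iff hposE).mp hone
    constructor
    · exact hlast
    · omega
  · rintro ⟨hlast, hs⟩
    have hsumE : ((S.erase last).map f).sum = (S.erase last).length := by omega
    have hone := (all_one_iff hposE).mpr hsumE
    intro k hk
    by_cases hne : k = last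
    · simpa [hne] using hlast
    · simpa [hne] using hone k ((hmemE k).mpr ⟨hne, hk⟩)

-- sum of counts over the distinct elements is the length
lemma sum_counts (xs : List Int) :
    ((PySem.Set.ofList xs).map (fun k => List.count k xs)).sum = xs.length := by
  have hperm : List.Perm (PySem.Set.ofList xs) xs.dedup := by
    rw [List.perm_ext_iff_of_nodup (PySem.Set.nodup_ofList xs) xs.nodup_dedup]
    intro a; rw [PySem.Set.mem_ofList, List.mem_dedup]
  calc ((PySem.Set.ofList xs).map (fun k => List.count k xs)).sum
      = ((xs.dedup).map (fun k => List.count k xs)).sum :=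
        (hperm.map (fun k => List.count k xs)).sum_eq
    _ = xs.length := List.sum_map_count_dedup_eq_length xs

-- ===== VERDICT (by name: the statement is the Claim_ definition above) =====
theorem is_valid_itinerary_spec : Claim_equal_is_valid_itinerary := by
  intro xs _
  unfold Spec_is_valid_itinerary is_valid_itinerary is_valid_itinerary_alt
  by_cases hnil : xs.length = 0
  · simp [hnil]
  · simp only [hnil, beq_iff_eq]
    cases hmax : PySem.List.max? xs (fun x => x) with
    | none => rfl
    | some last =>
      by_cases hguard : ((xs.length : Int) - 1) = last
      · simp only [bne, hguard, beq_self_eq_true, Bool.not_true, Bool.false_eq_true,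
          if_false]
        have hmemlast : last ∈ xs := PySem.List.max?_mem hmax
        have hfreq : (xs.foldl (fun d city => d.insert city (d.getD city 0 + 1))
            PySem.Dict.empty).items
            = (PySem.Set.ofList xs).map (fun k => (k, (List.count k xs : Int))) := by
          rw [freq_eq_counter, PySem.Dict.items_counter]
        rw [hfreq, isValidLoop_eq_all]
        have hall : ((PySem.Set.ofList xs).map (fun k => (k, (List.count k xs : Int)))).all
            (fun p => if p.1 = last then p.2 == 2 else p.2 == 1)
            = (PySem.Set.ofList xs).all (fun k => if k = last then (List.count k xs : Int) == 2
                else (List.count k xs : Int) == 1) := by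
          rw [List.all_map]; rfl
        rw [hall]
        have hpos : ∀ k ∈ (PySem.Set.ofList xs), 1 ≤ List.count k xs := by
          intro k hk
          exact List.count_pos_iff.mpr ((PySem.Set.mem_ofList xs k).mp hk)
        have hmemS : last ∈ (PySem.Set.ofList xs) := (PySem.Set.mem_ofList xs last).mpr hmemlast
        have hiff := key_iff (PySem.Set.nodup_ofList xs) hmemS hpos
        have hsum := sum_counts xs
        have hlenS : (PySem.Set.ofList xs).length ≤ xs.length := PySem.Set.length_ofList_le xs
        -- both sides as decidable propositions
        rw [Bool.eq_iff_iff]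
        simp only [List.all_eq_true, Bool.and_eq_true, beq_iff_eq,
          PySem.List.count]
        constructor
        · intro h
          have h' : ∀ k ∈ (PySem.Set.ofList xs), List.count k xs = if k = last then 2 else 1 := by
            intro k hk
            have := h k hk
            by_cases hke : k = last <;> simp_all <;> omega
          obtain ⟨h2, hs⟩ := hiff.mp h'
          refine ⟨by exact_mod_cast h2, ?_⟩
          omega
        · rintro ⟨h2, hlen⟩
          have h2' : List.count last xs = 2 := by exact_mod_cast h2
          have hs : ((PySem.Set.ofList xs).map (fun k => List.count k xs)).sum = (PySem.Set.ofList xs).length + 1 := by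
            omega
          have h' := hiff.mpr ⟨h2', hs⟩
          intro k hk
          have := h' k hk
          by_cases hke : k = last <;> simp_all
      · simp [bne, hguard]
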